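-- pv_equiv track=rewrite | github.com/maxreiss123/examples-paper | python_files/trainer.py | get_pheno_part_from_gene
-- ===== SOURCE A (Python) =====
-- def get_pheno_part_from_gene(gene_, symtable):
--     elements = []
--     temp_arity = 0
--     counter = 0
--     while True:
--         elem = gene_[counter]
--         if elem !="":
--             if symtable.get(elem,0) > 0 and len(elements) == 0:
--                     temp_arity += symtable.get(elem,0)
--                     elements.append(elem)
--                     counter += 1
--                     continue
--
--             temp_arity += symtable.get(elem,0)
--             elements.append(elem)
--             temp_arity += -1
--
--
--             if temp_arity <= 0:
--                     break
--         counter += 1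
--     return elements
-- ===== SOURCE B (Python) =====
-- def get_pheno_part_from_gene(gene_, symtable):
--     # Explicit stack of per-node remaining-child counts (the recursive
--     # prefix parser made iterative); no first-element special case needed.
--     out = []
--     stack = [1]          # one entry per open node: children still to read
--     idx = 0
--     while stack:
--         tok = gene_[idx]
--         idx += 1
--         if tok == "":
--             continue
--         out.append(tok)
--         stack[-1] -= 1
--         if stack[-1] == 0:
--             stack.pop()
--         n = symtable.get(tok, 0)
--         if n > 0:
--             stack.append(n)
--     return out
-- ===== Notes on version B (the rewrite author's own statement) =====
-- stated objective: alternative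
-- what changed: Replaces A's single running arity counter with its special-cased first element by an explicit stack of per-node remaining-child counts (the recursive prefix parser made iterative), which needs no first-element branch.
-- outside the precondition, e.g. on get_pheno_part_from_gene(['+', 'x', '1'], {'+': 2, 'x': -5}): A returns ['+', 'x'], B returns ['+', 'x', '1']
import Mathlib
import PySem

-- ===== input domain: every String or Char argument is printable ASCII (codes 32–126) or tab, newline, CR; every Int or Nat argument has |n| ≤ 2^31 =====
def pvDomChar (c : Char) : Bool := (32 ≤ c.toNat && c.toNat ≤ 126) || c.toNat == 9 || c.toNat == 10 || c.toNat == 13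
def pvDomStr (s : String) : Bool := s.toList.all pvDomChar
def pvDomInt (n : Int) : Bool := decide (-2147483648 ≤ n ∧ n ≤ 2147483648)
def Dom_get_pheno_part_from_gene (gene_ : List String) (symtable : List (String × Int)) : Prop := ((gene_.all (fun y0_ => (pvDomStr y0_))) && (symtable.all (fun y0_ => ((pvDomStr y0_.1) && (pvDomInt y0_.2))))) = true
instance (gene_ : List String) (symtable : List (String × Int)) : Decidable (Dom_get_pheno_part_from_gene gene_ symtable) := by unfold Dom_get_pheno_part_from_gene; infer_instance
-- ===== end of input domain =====

-- B replaces A's single running arity counter (with its special-cased first element)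
-- by an explicit stack of per-node remaining-child counts; same O(n) cost, different decomposition.


-- ===== PORT A =====
-- A's while-loop over gene_ (counter strictly increases each iteration, so it is a
-- structural recursion on the list); the [] case is Python's IndexError (outside Pre_), junk [].
def pvAuxA (symtable : List (String × Int)) : List String → List String → Int → List String
  | [], _, _ => []
  | e :: rest, elements, temp_arity =>
    if e ≠ "" then
      if (PySem.Dict.mk symtable).getD e 0 > 0 ∧ elements = [] then
        pvAuxA symtable rest (elements ++ [e]) (temp_arity + (PySem.Dict.mk symtable).getD e 0)
      else
        if temp_arity + (PySem.Dict.mk symtable).getD e 0 - 1 ≤ 0 then elements ++ [e]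
        else pvAuxA symtable rest (elements ++ [e]) (temp_arity + (PySem.Dict.mk symtable).getD e 0 - 1)
    else pvAuxA symtable rest elements temp_arity

def get_pheno_part_from_gene (gene_ : List String) (symtable : List (String × Int)) : List String :=
  pvAuxA symtable gene_ [] 0

-- ===== PORT B =====
-- Source B's while-loop; list head = Python's stack[-1] (push = cons, pop = tail);
-- [] gene with nonempty stack is Python's IndexError (outside Pre_), junk [].
def pvAuxB (symtable : List (String × Int)) : List String → List Int → List String → List String
  | _, [], out => out
  | [], _ :: _, _ => []
  | e :: rest, s :: ss, out =>
    if e = "" then pvAuxB symtable rest (s :: ss) out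
    else
      pvAuxB symtable rest
        (if (PySem.Dict.mk symtable).getD e 0 > 0
          then (PySem.Dict.mk symtable).getD e 0 :: (if s - 1 = 0 then ss else (s - 1) :: ss)
          else (if s - 1 = 0 then ss else (s - 1) :: ss))
        (out ++ [e])

def get_pheno_part_from_gene_alt (gene_ : List String) (symtable : List (String × Int)) : List String :=
  pvAuxB symtable gene_ [1] []

-- ===== PRECONDITION & SPEC =====
-- Pre_ excludes (a) inputs on which the prefix expression never completes inside gene_,
-- where Python A raises IndexError (B raises it too), and (b) genes containing a token
-- with a NEGATIVE symtable arity, a meaningless arity on which A's global counter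
-- truncates the expression mid-children while B treats the token as a leaf — a corner
-- no arity table specifies, where both behaviours are accidental.
def Pre_get_pheno_part_from_gene (gene_ : List String) (symtable : List (String × Int)) : Prop :=
  (∀ t ∈ gene_, t ≠ "" → 0 ≤ (PySem.Dict.mk symtable).getD t 0) ∧
  (∃ k, 1 ≤ k ∧ k ≤ (gene_.filter (· ≠ "")).length ∧
    (((gene_.filter (· ≠ "")).take k).map (fun t => (PySem.Dict.mk symtable).getD t 0)).sum = (k : Int) - 1)

instance (gene_ : List String) (symtable : List (String × Int)) : Decidable (Pre_get_pheno_part_from_gene gene_ symtable) := by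
  unfold Pre_get_pheno_part_from_gene
  have : Decidable (∃ k, 1 ≤ k ∧ k ≤ (gene_.filter (· ≠ "")).length ∧
      (((gene_.filter (· ≠ "")).take k).map (fun t => (PySem.Dict.mk symtable).getD t 0)).sum = (k : Int) - 1) := by
    apply decidable_of_iff (∃ k ≤ (gene_.filter (· ≠ "")).length, 1 ≤ k ∧
      (((gene_.filter (· ≠ "")).take k).map (fun t => (PySem.Dict.mk symtable).getD t 0)).sum = (k : Int) - 1)
    constructor
    · rintro ⟨k, h1, h2, h3⟩; exact ⟨k, h2, h1, h3⟩
    · rintro ⟨k, h1, h2, h3⟩; exact ⟨k, h2, h1, h3⟩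
  exact instDecidableAnd

def pvWitness_get_pheno_part_from_gene : List String × (List (String × Int)) :=
  (["+", "1", "2"], [("+", 2)])

def Spec_get_pheno_part_from_gene (gene_ : List String) (symtable : List (String × Int)) (out : List String) : Prop := out = get_pheno_part_from_gene_alt gene_ symtable
instance (gene_ : List String) (symtable : List (String × Int)) (out : List String) : Decidable (Spec_get_pheno_part_from_gene gene_ symtable out) := by unfold Spec_get_pheno_part_from_gene; infer_instance

-- ===== CLAIM (what is proved, stated in full; the proofs are below) =====
def Claim_equal_get_pheno_part_from_gene : Prop := ∀ (gene_ : List String) (symtable : List (String × Int)), Dom_get_pheno_part_from_gene gene_ symtable → Pre_get_pheno_part_from_gene gene_ symtable → Spec_get_pheno_part_from_gene gene_ symtable (get_pheno_part_from_gene gene_ symtable)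

-- ===== LEMMAS AND PROOFS =====

-- one-step unfoldings of the two loops
lemma pvA_skip (st : List (String × Int)) (rest : List String) (elements : List String) (temp : Int) :
    pvAuxA st ("" :: rest) elements temp = pvAuxA st rest elements temp := by
  simp [pvAuxA]

lemma pvA_step (st : List (String × Int)) (e : String) (rest elements : List String) (temp : Int)
    (he : e ≠ "") (hne : elements ≠ []) :
    pvAuxA st (e :: rest) elements temp =
      if temp + (PySem.Dict.mk st).getD e 0 - 1 ≤ 0 then elements ++ [e]
      else pvAuxA st rest (elements ++ [e]) (temp + (PySem.Dict.mk st).getD e 0 - 1) := by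
  rw [pvAuxA, if_pos he, if_neg (fun h => hne h.2)]

lemma pvA_first (st : List (String × Int)) (e : String) (rest : List String) (temp : Int)
    (he : e ≠ "") (hpos : (PySem.Dict.mk st).getD e 0 > 0) :
    pvAuxA st (e :: rest) [] temp = pvAuxA st rest [e] (temp + (PySem.Dict.mk st).getD e 0) := by
  rw [pvAuxA, if_pos he, if_pos ⟨hpos, rfl⟩]; rfl

lemma pvA_leaf (st : List (String × Int)) (e : String) (rest : List String) (temp : Int)
    (he : e ≠ "") (hpos : ¬ (PySem.Dict.mk st).getD e 0 > 0) :
    pvAuxA st (e :: rest) [] temp =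
      if temp + (PySem.Dict.mk st).getD e 0 - 1 ≤ 0 then [e]
      else pvAuxA st rest [e] (temp + (PySem.Dict.mk st).getD e 0 - 1) := by
  rw [pvAuxA, if_pos he, if_neg (fun h => hpos h.1)]; rfl

lemma pvB_skip (st : List (String × Int)) (rest : List String) (s : Int) (ss : List Int) (out : List String) :
    pvAuxB st ("" :: rest) (s :: ss) out = pvAuxB st rest (s :: ss) out := by
  simp [pvAuxB]

lemma pvB_step (st : List (String × Int)) (e : String) (rest : List String) (s : Int) (ss : List Int)
    (out : List String) (he : e ≠ "") :
    pvAuxB st (e :: rest) (s :: ss) out =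
      pvAuxB st rest
        (if (PySem.Dict.mk st).getD e 0 > 0
          then (PySem.Dict.mk st).getD e 0 :: (if s - 1 = 0 then ss else (s - 1) :: ss)
          else (if s - 1 = 0 then ss else (s - 1) :: ss))
        (out ++ [e]) := by
  rw [pvAuxB, if_neg he]

lemma pvB_empty_stack (st : List (String × Int)) (r : List String) (out : List String) :
    pvAuxB st r [] out = out := by
  cases r <;> rfl

-- a list of entries all ≥ 1 that is nonempty has sum ≥ 1
lemma pv_sum_ge_one {l : List Int} (h1 : ∀ x ∈ l, 1 ≤ x) (hne : l ≠ []) : 1 ≤ l.sum := by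
  cases l with
  | nil => exact absurd rfl hne
  | cons x xs =>
    have hx : 1 ≤ x := h1 x (by simp)
    have hxs : 0 ≤ xs.sum :=
      List.sum_nonneg (fun y hy => le_trans (by norm_num) (h1 y (List.mem_cons_of_mem _ hy)))
    simp only [List.sum_cons]; omega

-- main simulation: once the first token is consumed, A's counter equals the sum of
-- B's stack, every stack entry is ≥ 1, and the accumulated outputs coincide
lemma pv_step (st : List (String × Int)) :
    ∀ (r : List String) (stack : List Int) (out : List String) (temp : Int),
    stack ≠ [] → (∀ x ∈ stack, 1 ≤ x) → temp = stack.sum → out ≠ [] →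
    (∀ t ∈ r, t ≠ "" → 0 ≤ (PySem.Dict.mk st).getD t 0) →
    pvAuxA st r out temp = pvAuxB st r stack out := by
  intro r
  induction r with
  | nil =>
    intro stack out temp hne _ _ _ _
    cases stack with
    | nil => exact absurd rfl hne
    | cons s ss => rfl
  | cons e rest ih =>
    intro stack out temp hne h1 hsum hout har
    cases stack with
    | nil => exact absurd rfl hne
    | cons s ss =>
      by_cases he : e = ""
      · subst he
        rw [pvA_skip, pvB_skip]
        exact ih (s :: ss) out temp hne h1 hsum hout (fun t ht => har t (List.mem_cons_of_mem _ ht))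
      · rw [pvA_step st e rest out temp he hout, pvB_step st e rest s ss out he]
        have ha : 0 ≤ (PySem.Dict.mk st).getD e 0 := har e (by simp) he
        generalize hga : (PySem.Dict.mk st).getD e 0 = a at ha ⊢
        have hs : 1 ≤ s := h1 s (by simp)
        have hss : ∀ x ∈ ss, 1 ≤ x := fun x hx => h1 x (List.mem_cons_of_mem _ hx)
        set S' : List Int := if s - 1 = 0 then ss else (s - 1) :: ss with hS'
        set S'' : List Int := if a > 0 then a :: S' else S' with hS''
        have hsumS' : S'.sum = temp - 1 := by
          by_cases h : s - 1 = 0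
          · rw [hS', if_pos h, hsum]; simp only [List.sum_cons]; omega
          · rw [hS', if_neg h, hsum]; simp only [List.sum_cons]; omega
        have hsumS'' : S''.sum = temp + a - 1 := by
          by_cases h : a > 0
          · rw [hS'', if_pos h]; simp only [List.sum_cons]; omega
          · rw [hS'', if_neg h]; omega
        have h1S' : ∀ x ∈ S', 1 ≤ x := by
          intro x hx
          by_cases h : s - 1 = 0
          · exact hss x (by rwa [hS', if_pos h] at hx)
          · rw [hS', if_neg h] at hx
            rcases List.mem_cons.mp hx with h' | h'
            · omega
            · exact hss x h'
        have h1S'' : ∀ x ∈ S'', 1 ≤ x := by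
          intro x hx
          by_cases h : a > 0
          · rw [hS'', if_pos h] at hx
            rcases List.mem_cons.mp hx with h' | h'
            · omega
            · exact h1S' x h'
          · exact h1S' x (by rwa [hS'', if_neg h] at hx)
        by_cases hdone : S'' = []
        · have hz : temp + a - 1 = 0 := by rw [← hsumS'', hdone]; rfl
          rw [if_pos (by omega), hdone, pvB_empty_stack]
        · have hp : 1 ≤ temp + a - 1 := by rw [← hsumS'']; exact pv_sum_ge_one h1S'' hdone
          rw [if_neg (by omega)]
          exact ih S'' (out ++ [e]) (temp + a - 1) hdone h1S'' hsumS''.symm (by simp)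
            (fun t ht => har t (List.mem_cons_of_mem _ ht))

-- entry: A from (elements = [], temp = 0) matches B from stack = [1]
lemma pv_entry (st : List (String × Int)) :
    ∀ (r : List String),
    (∀ t ∈ r, t ≠ "" → 0 ≤ (PySem.Dict.mk st).getD t 0) →
    pvAuxA st r [] 0 = pvAuxB st r [1] [] := by
  intro r
  induction r with
  | nil => intro _; rfl
  | cons e rest ih =>
    intro har
    by_cases he : e = ""
    · subst he
      rw [pvA_skip, pvB_skip]
      exact ih (fun t ht => har t (List.mem_cons_of_mem _ ht))
    · have ha : 0 ≤ (PySem.Dict.mk st).getD e 0 := har e (by simp) he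
      by_cases hpos : (PySem.Dict.mk st).getD e 0 > 0
      · -- A's first-element branch; B pops the initial 1 and pushes the arity
        rw [pvA_first st e rest 0 he hpos, pvB_step st e rest 1 [] [] he,
            if_pos hpos, if_pos (by norm_num), zero_add]
        exact pv_step st rest [(PySem.Dict.mk st).getD e 0] [e] ((PySem.Dict.mk st).getD e 0)
          (by simp) (by intro x hx; simp at hx; omega) (by simp) (by simp)
          (fun t ht => har t (List.mem_cons_of_mem _ ht))
      · -- arity 0: a single leaf; both return [e]
        have haz : (PySem.Dict.mk st).getD e 0 = 0 := by omega
        rw [pvA_leaf st e rest 0 he hpos, pvB_step st e rest 1 [] [] he, if_neg hpos,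
            if_pos (show (0:Int) + (PySem.Dict.mk st).getD e 0 - 1 ≤ 0 by omega)]
        norm_num [pvB_empty_stack]

-- ===== VERDICT (by name: the statement is the Claim_ definition above) =====
theorem get_pheno_part_from_gene_spec : Claim_equal_get_pheno_part_from_gene := by
  intro gene_ symtable _ hpre
  unfold Spec_get_pheno_part_from_gene get_pheno_part_from_gene get_pheno_part_from_gene_alt
  exact pv_entry symtable gene_ hpre.1
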